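-- pv_equiv track=rewrite | github.com/Giovix92/GTools-Mac | modules/mkssdt.py | find_previous_hex
-- ===== SOURCE A (Python) =====
-- def is_hex(line):
-- 	return ':' in line.split('//')[0]
--
-- def get_hex(line):
-- 	# strip the header and commented end
-- 	return line.split(':')[1].split('//')[0].replace(' ','')
--
-- def find_previous_hex(dsdt_lines, index=0):
-- 	# Returns the index of the previous set of hex digits before the passed index
-- 	start_index = -1
-- 	end_index   = -1
-- 	old_hex = True
-- 	for i,line in enumerate(dsdt_lines[index::-1]):
-- 		if old_hex:
-- 			if not is_hex(line):
-- 				# Broke out of the old hex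
-- 				old_hex = False
-- 			continue
-- 		# Not old_hex territory - check if we got new hex
-- 		if is_hex(line): # Checks for a :, but not in comments
-- 			end_index = index-i
-- 			hex_text,start_index = get_hex_ending_at(dsdt_lines, end_index)
-- 			return (hex_text, start_index, end_index)
-- 	return ('',start_index,end_index)
--
-- def get_hex_ending_at(dsdt_lines, start_index):
-- 	# Returns a tuple of the hex, and the ending index
-- 	hex_text = ''
-- 	index = -1
-- 	for i,x in enumerate(dsdt_lines[start_index::-1]):
-- 		if not is_hex(x):
-- 			break
-- 		hex_text = get_hex(x)+hex_text
-- 		index = start_index-i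
-- 	return (hex_text, index)
-- ===== SOURCE B (Python) =====
-- # B: one forward pass over the prefix tracking (last hex position, candidate) instead of
-- # A's backward flag-staged scan; same return value everywhere.
--
-- def _is_hex(line):
--     return ':' in line.split('//')[0]
--
-- def _get_hex(line):
--     return line.split(':')[1].split('//')[0].replace(' ', '')
--
-- def _hex_ending_at(dsdt_lines, end_index):
--     block = []
--     for x in dsdt_lines[end_index::-1]:
--         if not _is_hex(x):
--             break
--         block.append(x)
--     if not block:
--         return ('', -1)
--     return (''.join(_get_hex(x) for x in reversed(block)), end_index - (len(block) - 1))
--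
-- def find_previous_hex(dsdt_lines, index=0):
--     fwd = dsdt_lines[index::-1][::-1]      # the scanned prefix, in forward order
--     last_hex = None                        # forward position of the most recent hex line
--     cand = None                            # last_hex as of the latest non-hex line seen
--     for f, line in enumerate(fwd):
--         if _is_hex(line):
--             last_hex = f
--         else:
--             cand = last_hex
--     if cand is None:
--         return ('', -1, -1)
--     end_index = index - (len(fwd) - 1 - cand)
--     hex_text, start_index = _hex_ending_at(dsdt_lines, end_index)
--     return (hex_text, start_index, end_index)
-- ===== Notes on version B (the rewrite author's own statement) =====
-- stated objective: alternative
-- what changed: A's backward boolean-flag scan over the reversed slice is replaced by a single forward pass over the prefix that tracks the latest hex position and snapshots it at every non-hex line (the final snapshot is the previous block's end), and the block helper collects the run and joins its payloads instead of prepend-accumulating.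
import Mathlib
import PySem

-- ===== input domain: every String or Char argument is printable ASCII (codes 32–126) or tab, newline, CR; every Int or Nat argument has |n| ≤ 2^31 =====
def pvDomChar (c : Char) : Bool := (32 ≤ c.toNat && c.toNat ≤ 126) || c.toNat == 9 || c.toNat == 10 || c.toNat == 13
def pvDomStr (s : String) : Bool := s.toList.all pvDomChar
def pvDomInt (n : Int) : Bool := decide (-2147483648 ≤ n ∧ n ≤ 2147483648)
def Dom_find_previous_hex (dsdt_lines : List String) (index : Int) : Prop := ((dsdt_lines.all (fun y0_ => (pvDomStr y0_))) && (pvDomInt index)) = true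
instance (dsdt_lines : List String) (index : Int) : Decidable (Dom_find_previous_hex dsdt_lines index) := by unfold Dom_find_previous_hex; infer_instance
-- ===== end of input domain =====

-- B replaces A's backward boolean-flag scan by a single forward pass over the prefix that
-- tracks the latest hex position and snapshots it at each non-hex line, and its block
-- helper collects the run then joins payloads; objective: alternative decomposition, same cost.

-- shared primitive helpers (identical one-line expressions in both Pythons)
-- ':' in line.split('//')[0]
def pv_is_hex (line : String) : Bool :=
  PySem.Str.isIn ":" (((PySem.Str.split? line "//").getD [line]).headD "")

-- line.split(':')[1].split('//')[0].replace(' ','')  (only called on lines where the [1] exists)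
def pv_get_hex (line : String) : String :=
  PySem.Str.replace
    (((PySem.Str.split? (PySem.List.pyGetD ((PySem.Str.split? line ":").getD [line]) 1 "") "//").getD [""]).headD "")
    " " ""

-- dsdt_lines[i::-1]  (step -1 never makes slice? raise, so getD is exact)
def pv_revFrom (xs : List String) (i : Int) : List String :=
  (PySem.List.slice? xs (some i) none (-1)).getD []

-- ===== PORT A =====
def get_hex_ending_at_loop : List String → Int → Int → String → Int → String × Int
  | [], _, _, hex_text, idx => (hex_text, idx)
  | x :: xs, start, i, hex_text, idx =>
    if !pv_is_hex x then (hex_text, idx)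
    else get_hex_ending_at_loop xs start (i + 1) (pv_get_hex x ++ hex_text) (start - i)

def get_hex_ending_at (dsdt_lines : List String) (start_index : Int) : String × Int :=
  get_hex_ending_at_loop (pv_revFrom dsdt_lines start_index) start_index 0 "" (-1)

def find_previous_hex_loop (dsdt_lines : List String) (index : Int) :
    List String → Int → Bool → String × Int × Int
  | [], _, _ => ("", -1, -1)
  | line :: rest, i, old_hex =>
    if old_hex then
      find_previous_hex_loop dsdt_lines index rest (i + 1)
        (if !pv_is_hex line then false else old_hex)
    else if pv_is_hex line then
      let end_index := index - i
      let r := get_hex_ending_at dsdt_lines end_index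
      (r.1, r.2, end_index)
    else
      find_previous_hex_loop dsdt_lines index rest (i + 1) old_hex

def find_previous_hex (dsdt_lines : List String) (index : Int) : String × Int × Int :=
  find_previous_hex_loop dsdt_lines index (pv_revFrom dsdt_lines index) 0 true

-- ===== PORT B =====
-- B's forward loop: state (last_hex, cand), f the forward position of the head
def pv_fwd_scan : List String → Int → Option Int × Option Int → Option Int × Option Int
  | [], _, st => st
  | line :: rest, f, st =>
    if pv_is_hex line then pv_fwd_scan rest (f + 1) (some f, st.2)
    else pv_fwd_scan rest (f + 1) (st.1, st.1)

-- the collect loop of _hex_ending_at (append until the first non-hex line)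
def pv_takeHex : List String → List String
  | [] => []
  | x :: xs => if !pv_is_hex x then [] else x :: pv_takeHex xs

def pv_hex_ending_at (dsdt_lines : List String) (end_index : Int) : String × Int :=
  let block := pv_takeHex (pv_revFrom dsdt_lines end_index)
  if block.isEmpty then ("", -1)
  else (PySem.Str.join "" (block.reverse.map pv_get_hex),
        end_index - ((block.length : Int) - 1))

def find_previous_hex_alt (dsdt_lines : List String) (index : Int) : String × Int × Int :=
  let fwd := (pv_revFrom dsdt_lines index).reverse
  match (pv_fwd_scan fwd 0 (none, none)).2 with
  | none => ("", -1, -1)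
  | some c =>
    let end_index := index - ((fwd.length : Int) - 1 - c)
    let r := pv_hex_ending_at dsdt_lines end_index
    (r.1, r.2, end_index)

-- ===== PRECONDITION & SPEC =====
def Spec_find_previous_hex (dsdt_lines : List String) (index : Int) (out : String × Int × Int) : Prop := out = find_previous_hex_alt dsdt_lines index
instance (dsdt_lines : List String) (index : Int) (out : String × Int × Int) : Decidable (Spec_find_previous_hex dsdt_lines index out) := by unfold Spec_find_previous_hex; infer_instance

-- ===== CLAIM (what is proved, stated in full; the proofs are below) =====
def Claim_equal_find_previous_hex : Prop := ∀ (dsdt_lines : List String) (index : Int), Dom_find_previous_hex dsdt_lines index → Spec_find_previous_hex dsdt_lines index (find_previous_hex dsdt_lines index)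

-- ===== LEMMAS AND PROOFS =====

theorem flatten_intersperse_nil : ∀ (l : List (List Char)), (List.intersperse [] l).flatten = l.flatten
  | [] => rfl
  | [_] => rfl
  | a :: b :: t => by
    simpa [List.intersperse] using flatten_intersperse_nil (b :: t)

-- A's prepend-accumulating hex loop, characterised through pv_takeHex
theorem geha_loop_eq : ∀ (rev : List String) (s i : Int) (acc : String) (idx : Int),
    get_hex_ending_at_loop rev s i acc idx =
      (match pv_takeHex rev with
       | [] => (acc, idx)
       | block@(_ :: _) =>
         (String.ofList (((block.reverse.map pv_get_hex).map String.toList).flatten ++ acc.toList),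
          s - (i + block.length - 1)))
  | [], s, i, acc, idx => rfl
  | x :: xs, s, i, acc, idx => by
    by_cases hx : pv_is_hex x
    · rw [show get_hex_ending_at_loop (x :: xs) s i acc idx =
            get_hex_ending_at_loop xs s (i + 1) (pv_get_hex x ++ acc) (s - i) from by
          simp [get_hex_ending_at_loop, hx]]
      rw [geha_loop_eq xs s (i + 1) (pv_get_hex x ++ acc) (s - i)]
      rw [show pv_takeHex (x :: xs) = x :: pv_takeHex xs from by simp [pv_takeHex, hx]]
      cases hb : pv_takeHex xs with
      | nil =>
        refine Prod.ext ?_ (by simp)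
        apply String.ext
        simp
      | cons y ys =>
        refine Prod.ext ?_ (by simp; ring_nf)
        apply String.ext
        simp
    · simp [get_hex_ending_at_loop, pv_takeHex, hx]

-- A's helper equals B's helper
theorem helper_eq (l : List String) (e : Int) :
    get_hex_ending_at l e = pv_hex_ending_at l e := by
  unfold get_hex_ending_at pv_hex_ending_at
  rw [geha_loop_eq]
  cases hb : pv_takeHex (pv_revFrom l e) with
  | nil => simp
  | cons y ys =>
    rw [if_neg (by simp : ¬((y :: ys).isEmpty = true))]
    refine Prod.ext ?_ (by push_cast; ring_nf)
    apply String.ext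
    simp [PySem.Chars.join, List.intercalate, flatten_intersperse_nil, List.map_map]

-- the head of dropWhile p refutes p
theorem dropWhile_head_false (p : String → Bool) :
    ∀ (xs : List String) (x : String) (r : List String),
      xs.dropWhile p = x :: r → p x = false
  | [], x, r => by simp [List.dropWhile]
  | y :: ys, x, r => by
    by_cases hy : p y
    · intro h
      exact dropWhile_head_false p ys x r (by simpa [List.dropWhile, hy] using h)
    · intro h
      simp [List.dropWhile, hy] at h
      rw [← h.1]; simpa using hy

-- phase 1 of A (old_hex = true): drop the leading hex run, consume one more line, flip the flag
theorem phase1_eq (L : List String) (index : Int) :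
    ∀ (xs : List String) (i : Int),
      find_previous_hex_loop L index xs i true =
        (match xs.dropWhile pv_is_hex with
         | [] => ("", -1, -1)
         | _ :: r => find_previous_hex_loop L index r (i + ((xs.length : Int) - r.length)) false)
  | [], i => rfl
  | x :: xs, i => by
    by_cases hx : pv_is_hex x
    · rw [show find_previous_hex_loop L index (x :: xs) i true =
            find_previous_hex_loop L index xs (i + 1) true from by
          simp [find_previous_hex_loop, hx]]
      rw [phase1_eq L index xs (i + 1)]
      rw [show (x :: xs).dropWhile pv_is_hex = xs.dropWhile pv_is_hex from by
          simp [List.dropWhile, hx]]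
      cases h : xs.dropWhile pv_is_hex with
      | nil => rfl
      | cons y r =>
        dsimp only
        have : i + 1 + ((xs.length : Int) - (r.length : Int)) =
            i + (((x :: xs).length : Int) - (r.length : Int)) := by
          simp only [List.length_cons]; push_cast; ring
        rw [this]
    · have hd : (x :: xs).dropWhile pv_is_hex = x :: xs := by simp [List.dropWhile, hx]
      rw [hd]
      have : find_previous_hex_loop L index (x :: xs) i true =
          find_previous_hex_loop L index xs (i + 1) false := by
        simp [find_previous_hex_loop, hx]
      rw [this]
      congr 1
      simp

-- phase 2 of A (old_hex = false): drop the non-hex gap, then answer at the first hex line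
theorem phase2_eq (L : List String) (index : Int) :
    ∀ (xs : List String) (i : Int),
      find_previous_hex_loop L index xs i false =
        (match xs.dropWhile (fun x => !pv_is_hex x) with
         | [] => ("", -1, -1)
         | u@(_ :: _) =>
           let e := index - (i + ((xs.length : Int) - u.length));
           let r := get_hex_ending_at L e
           (r.1, r.2, e))
  | [], i => rfl
  | x :: xs, i => by
    by_cases hx : pv_is_hex x
    · have hd : (x :: xs).dropWhile (fun x => !pv_is_hex x) = x :: xs := by
        simp [List.dropWhile, hx]
      rw [hd]
      simp only [find_previous_hex_loop, hx]
      simp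
    · rw [show find_previous_hex_loop L index (x :: xs) i false =
            find_previous_hex_loop L index xs (i + 1) false from by
          simp [find_previous_hex_loop, hx]]
      rw [phase2_eq L index xs (i + 1)]
      rw [show (x :: xs).dropWhile (fun x => !pv_is_hex x) = xs.dropWhile (fun x => !pv_is_hex x) from by
          simp [List.dropWhile, hx]]
      cases h : xs.dropWhile (fun x => !pv_is_hex x) with
      | nil => rfl
      | cons y r =>
        dsimp only
        have : i + 1 + ((xs.length : Int) - ((y :: r).length : Int)) =
            i + (((x :: xs).length : Int) - ((y :: r).length : Int)) := by
          simp only [List.length_cons]; push_cast; ring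
        rw [this]

-- B's forward scan over an appended tail
theorem fwd_scan_append : ∀ (xs ys : List String) (f : Int) (st : Option Int × Option Int),
    pv_fwd_scan (xs ++ ys) f st = pv_fwd_scan ys (f + xs.length) (pv_fwd_scan xs f st)
  | [], ys, f, st => by simp [pv_fwd_scan]
  | x :: xs, ys, f, st => by
    by_cases hx : pv_is_hex x
    · rw [show (x :: xs) ++ ys = x :: (xs ++ ys) from rfl]
      simp only [pv_fwd_scan, hx, if_pos]
      rw [fwd_scan_append xs ys (f + 1) (some f, st.2)]
      congr 1
      simp only [List.length_cons]
      push_cast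
      ring
    · rw [show (x :: xs) ++ ys = x :: (xs ++ ys) from rfl]
      simp only [pv_fwd_scan, hx, if_neg, Bool.false_eq_true, not_false_iff]
      rw [fwd_scan_append xs ys (f + 1) (st.1, st.1)]
      congr 1
      simp only [List.length_cons]
      push_cast
      ring

-- B's forward scan of rev.reverse, characterised by the two dropWhile suffixes of rev
theorem fwd_scan_spec : ∀ (rev : List String),
    pv_fwd_scan rev.reverse 0 (none, none) =
      ((match rev.dropWhile (fun x => !pv_is_hex x) with
        | [] => (none : Option Int)
        | v@(_ :: _) => some ((v.length : Int) - 1)),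
       (match (rev.dropWhile pv_is_hex).dropWhile (fun x => !pv_is_hex x) with
        | [] => (none : Option Int)
        | u@(_ :: _) => some ((u.length : Int) - 1)))
  | [] => rfl
  | x :: r => by
    rw [show (x :: r).reverse = r.reverse ++ [x] from by simp]
    rw [fwd_scan_append r.reverse [x] 0 (none, none)]
    rw [fwd_scan_spec r]
    by_cases hx : pv_is_hex x
    · rw [show (x :: r).dropWhile (fun x => !pv_is_hex x) = x :: r from by
          simp [List.dropWhile, hx]]
      rw [show (x :: r).dropWhile pv_is_hex = r.dropWhile pv_is_hex from by
          simp [List.dropWhile, hx]]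
      simp only [pv_fwd_scan, hx, if_pos]
      simp
    · rw [show (x :: r).dropWhile (fun x => !pv_is_hex x) = r.dropWhile (fun x => !pv_is_hex x) from by
          simp [List.dropWhile, hx]]
      rw [show (x :: r).dropWhile pv_is_hex = x :: r from by
          simp [List.dropWhile, hx]]
      rw [show ((x :: r).dropWhile (fun x => !pv_is_hex x) : List String) = r.dropWhile (fun x => !pv_is_hex x) from by
          simp [List.dropWhile, hx]]
      simp only [pv_fwd_scan, hx]
      simp

-- dropWhile is a suffix, so its length is bounded
theorem dropWhile_length_le (p : String → Bool) (xs : List String) :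
    (xs.dropWhile p).length ≤ xs.length :=
  (List.dropWhile_sublist p).length_le

-- ===== VERDICT (by name: the statement is the Claim_ definition above) =====
theorem find_previous_hex_spec : Claim_equal_find_previous_hex := by
  intro L index _
  unfold Spec_find_previous_hex find_previous_hex find_previous_hex_alt
  dsimp only
  rw [phase1_eq]
  rw [fwd_scan_spec (pv_revFrom L index)]
  set rev := pv_revFrom L index with hrev
  cases ht : rev.dropWhile pv_is_hex with
  | nil =>
    simp only [List.dropWhile_nil]
  | cons h r =>
    have hh : pv_is_hex h = false := dropWhile_head_false _ _ _ _ ht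
    have hu : (h :: r).dropWhile (fun x => !pv_is_hex x) = r.dropWhile (fun x => !pv_is_hex x) := by
      simp [List.dropWhile, hh]
    simp only [hu]
    rw [phase2_eq]
    cases hu2 : r.dropWhile (fun x => !pv_is_hex x) with
    | nil => simp
    | cons y u =>
      have hlen_t : (h :: r).length ≤ rev.length := by
        rw [← ht]; exact dropWhile_length_le _ _
      have hlen_u : (y :: u).length ≤ r.length := by
        rw [← hu2]; exact dropWhile_length_le _ _
      have harith :
          index - ((0 : Int) + ((rev.length : Int) - (r.length : Int)) +
            ((r.length : Int) - ((y :: u).length : Int))) =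
          index - (((rev.reverse.length : Int)) - 1 - (((y :: u).length : Int) - 1)) := by
        simp only [List.length_cons, List.length_reverse] at hlen_t hlen_u ⊢
        push_cast
        omega
      simp only [helper_eq]
      rw [harith]
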